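-- pv_equiv track=rewrite | github.com/bernikr/coding-contest | 38/src/level3.py | check_route_valid
-- ===== SOURCE A (Python) =====
-- import itertools
--
-- def check_route_valid(level, route):
--     discovered_tiles = {route[0]}
--     discovered_diags = set()
--     for prev, cur in itertools.pairwise(route):
--         if cur in discovered_tiles:
--             return False
--         discovered_tiles.add(cur)
--         if cur + prev in discovered_diags:
--             return False
--         discovered_diags.add(cur + prev)
--     return True
-- ===== SOURCE B (Python) =====
-- import itertools
--
-- def check_route_valid(level, route):
--     def has_dup(xs):
--         ys = sorted(xs)
--         return any(a == b for a, b in itertools.pairwise(ys))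
--     diags = [cur + prev for prev, cur in itertools.pairwise(route)]
--     return not has_dup(route) and not has_dup(diags)
-- ===== Notes on version B (the rewrite author's own statement) =====
-- stated objective: alternative
-- what changed: Replaces A's incremental hash-set membership loop with early returns by a sort-based duplicate check: sort the tiles and the list of adjacent concatenations and scan each sorted list once for equal neighbours (no sets maintained at all).
import Mathlib
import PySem

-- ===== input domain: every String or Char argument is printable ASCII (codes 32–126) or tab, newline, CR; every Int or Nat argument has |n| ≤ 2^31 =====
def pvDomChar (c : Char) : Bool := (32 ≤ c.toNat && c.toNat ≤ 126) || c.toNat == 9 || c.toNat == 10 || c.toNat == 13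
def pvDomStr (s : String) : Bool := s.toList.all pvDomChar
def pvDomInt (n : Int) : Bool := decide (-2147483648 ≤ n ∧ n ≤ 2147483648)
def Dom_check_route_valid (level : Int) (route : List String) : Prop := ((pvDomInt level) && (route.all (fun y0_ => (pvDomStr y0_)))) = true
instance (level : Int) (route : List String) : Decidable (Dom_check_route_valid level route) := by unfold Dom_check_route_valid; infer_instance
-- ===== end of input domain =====

-- B replaces A's incremental membership sets and early returns by a sort-then-adjacent-scan duplicate check (alternative algorithm, no sets).


-- ===== PORT A =====
-- the for-loop over itertools.pairwise(route) with its two early returns, carried state = (discovered_tiles, discovered_diags)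
def checkLoopA : String → List String → PySem.Set String → PySem.Set String → Bool
  | _, [], _, _ => true
  | prev, cur :: rest, tiles, diags =>
    if PySem.Set.contains tiles cur then false
    else
      let tiles' := PySem.Set.add tiles cur
      if PySem.Set.contains diags (cur ++ prev) then false
      else checkLoopA cur rest tiles' (PySem.Set.add diags (cur ++ prev))

def check_route_valid (level : Int) (route : List String) : Bool :=
  match route with
  | [] => false          -- route[0] raises IndexError: excluded by Pre_
  | h :: t => checkLoopA h t (PySem.Set.ofList [h]) PySem.Set.empty

-- ===== PORT B =====
-- has_dup: sort, then scan once for equal adjacent elements (itertools.pairwise = zip(ys, ys[1:]))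
def hasDupB (xs : List String) : Bool :=
  let ys := PySem.List.sorted xs (fun x => x) false
  (ys.zip ys.tail).any (fun p => p.1 == p.2)

def check_route_valid_alt (level : Int) (route : List String) : Bool :=
  let diags := (route.zip route.tail).map (fun pc => pc.2 ++ pc.1)
  !hasDupB route && !hasDupB diags

-- ===== PRECONDITION & SPEC =====
-- Pre_ excludes only the empty route, on which A raises IndexError at route[0].
def Pre_check_route_valid (level : Int) (route : List String) : Prop := route ≠ []
instance (level : Int) (route : List String) : Decidable (Pre_check_route_valid level route) := by unfold Pre_check_route_valid; infer_instance
def pvWitness_check_route_valid : Int × List String := (3, ["a", "b", "c"])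

def Spec_check_route_valid (level : Int) (route : List String) (out : Bool) : Prop := out = check_route_valid_alt level route
instance (level : Int) (route : List String) (out : Bool) : Decidable (Spec_check_route_valid level route out) := by unfold Spec_check_route_valid; infer_instance

-- ===== CLAIM (what is proved, stated in full; the proofs are below) =====
def Claim_equal_check_route_valid : Prop := ∀ (level : Int) (route : List String), Dom_check_route_valid level route → Pre_check_route_valid level route → Spec_check_route_valid level route (check_route_valid level route)

-- ===== LEMMAS AND PROOFS =====

-- "every element of l is outside s, and l itself has no duplicates"
def Fresh (s : List String) (l : List String) : Prop := l.Nodup ∧ ∀ x ∈ l, x ∉ s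

-- the diagonal strings produced while prev starts at p and the remaining route is l
def diagsOf (p : String) (l : List String) : List String :=
  ((p :: l).zip l).map (fun pc => pc.2 ++ pc.1)

lemma diagsOf_cons (p c : String) (l : List String) :
    diagsOf p (c :: l) = (c ++ p) :: diagsOf c l := rfl

lemma loopA_iff (rest : List String) : ∀ (prev : String) (tiles diags : PySem.Set String),
    checkLoopA prev rest tiles diags = true ↔ Fresh tiles rest ∧ Fresh diags (diagsOf prev rest) := by
  induction rest with
  | nil => intro prev tiles diags; simp [checkLoopA, Fresh, diagsOf]
  | cons c rest ih =>
    intro prev tiles diags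
    simp only [checkLoopA, diagsOf_cons]
    by_cases hc : c ∈ tiles
    · simp only [(PySem.Set.contains_iff tiles c).mpr hc, if_true]
      simp [Fresh, hc]
    · have hc' : PySem.Set.contains tiles c = false := by
        simpa using (fun h => hc ((PySem.Set.contains_iff tiles c).mp h))
      simp only [hc', if_false, Bool.false_eq_true]
      by_cases hd : (c ++ prev) ∈ diags
      · simp only [(PySem.Set.contains_iff diags (c ++ prev)).mpr hd, if_true]
        simp [Fresh, hd]
      · have hd' : PySem.Set.contains diags (c ++ prev) = false := by
          simpa using (fun h => hd ((PySem.Set.contains_iff diags (c ++ prev)).mp h))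
        simp only [hd', if_false, Bool.false_eq_true]
        rw [ih]
        simp only [Fresh, List.nodup_cons, List.mem_cons]
        constructor
        · rintro ⟨⟨hn, ht⟩, hm, hg⟩
          refine ⟨⟨⟨?_, hn⟩, ?_⟩, ⟨⟨?_, hm⟩, ?_⟩⟩
          · intro hcr
            exact (ht c hcr (by simp [PySem.Set.mem_add]))
          · intro x hx
            rcases hx with rfl | hx
            · exact hc
            · exact fun hxs => ht x hx (by simp [PySem.Set.mem_add, hxs])
          · intro hdm
            exact (hg (c ++ prev) hdm (by simp [PySem.Set.mem_add]))
          · intro x hx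
            rcases hx with rfl | hx
            · exact hd
            · exact fun hxs => hg x hx (by simp [PySem.Set.mem_add, hxs])
        · rintro ⟨⟨⟨hcr, hn⟩, ht⟩, ⟨⟨hdm, hm⟩, hg⟩⟩
          refine ⟨⟨hn, ?_⟩, hm, ?_⟩
          · intro x hx hxa
            rcases (PySem.Set.mem_add tiles c x).mp hxa with hxs | rfl
            · exact ht x (Or.inr hx) hxs
            · exact hcr hx
          · intro x hx hxa
            rcases (PySem.Set.mem_add diags (c ++ prev) x).mp hxa with hxs | rfl
            · exact hg x (Or.inr hx) hxs
            · exact hdm hx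

-- in a ≤-sorted list, "no equal adjacent pair" is exactly Nodup
lemma adjacent_scan_iff : ∀ (ys : List String), ys.Pairwise (· ≤ ·) →
    (((ys.zip ys.tail).any (fun p => p.1 == p.2)) = false ↔ ys.Nodup) := by
  intro ys
  induction ys with
  | nil => intro _; simp
  | cons a t ih =>
    intro hp
    match t with
    | [] => simp
    | b :: t' =>
      have hp' : (b :: t').Pairwise (· ≤ ·) := hp.tail
      have hle : ∀ x ∈ b :: t', a ≤ x := (List.pairwise_cons.mp hp).1
      have hab : a ≤ b := hle b (by simp)
      have hble : ∀ x ∈ t', b ≤ x := (List.pairwise_cons.mp hp').1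
      have ihz := ih hp'
      show (((a, b) :: ((b :: t').zip t')).any (fun p => p.1 == p.2) = false ↔ (a :: b :: t').Nodup)
      simp only [List.any_cons, Bool.or_eq_false_iff, beq_eq_false_iff_ne, ne_eq]
      rw [show ((b :: t').zip t') = ((b :: t').zip (b :: t').tail) from rfl, ihz]
      simp only [List.nodup_cons, List.mem_cons]
      constructor
      · rintro ⟨hne, hnd⟩
        refine ⟨fun hmem => ?_, hnd⟩
        rcases hmem with rfl | hmem
        · exact hne rfl
        · have h1 : a ≤ b := hab
          have h2 : b ≤ a := hble a hmem
          exact hne (le_antisymm h1 h2)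
      · rintro ⟨hnm, hnd⟩
        exact ⟨fun h => hnm (Or.inl h), hnd⟩

lemma hasDupB_false_iff (xs : List String) : hasDupB xs = false ↔ xs.Nodup := by
  unfold hasDupB
  rw [adjacent_scan_iff _ (PySem.List.sorted_pairwise xs (fun x => x))]
  exact (PySem.List.sorted_perm xs (fun x => x) false).nodup_iff

-- ===== VERDICT (by name: the statement is the Claim_ definition above) =====
theorem check_route_valid_spec : Claim_equal_check_route_valid := by
  intro level route _ hpre
  unfold Spec_check_route_valid
  match route with
  | [] => exact absurd rfl hpre
  | h :: t =>
    show checkLoopA h t (PySem.Set.ofList [h]) PySem.Set.empty = check_route_valid_alt level (h :: t)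
    have hofl : PySem.Set.ofList [h] = [h] := rfl
    have hdiags : ((h :: t).zip (h :: t).tail).map (fun pc => pc.2 ++ pc.1) = diagsOf h t := rfl
    have hB : check_route_valid_alt level (h :: t)
        = (!hasDupB (h :: t) && !hasDupB (diagsOf h t)) := by
      unfold check_route_valid_alt
      rw [hdiags]
    rw [hB, hofl]
    rw [Bool.eq_iff_iff]
    rw [loopA_iff]
    simp only [Bool.and_eq_true, Bool.not_eq_true', hasDupB_false_iff]
    simp only [Fresh, List.nodup_cons, List.mem_singleton]
    constructor
    · rintro ⟨⟨hn, ht⟩, hdn, _⟩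
      exact ⟨⟨fun hht => ht h hht rfl, hn⟩, hdn⟩
    · rintro ⟨⟨hh, hn⟩, hdn⟩
      refine ⟨⟨hn, ?_⟩, hdn, ?_⟩
      · intro x hx hxe
        rw [hxe] at hx; exact hh hx
      · intro x _ hx
        simp [PySem.Set.empty] at hx
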